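-- pv_equiv track=rewrite | github.com/miaekim/EPIJudge | epi_judge_python/minimum_distance_3_sorted_arrays.py | find_closest_elements_in_sorted_arrays
-- ===== SOURCE A (Python) =====
-- from typing import List
--
-- def find_closest_elements_in_sorted_arrays(sorted_arrays: List[List[int]]
--                                            ) -> int:
--     sorted_iters = [iter(array) for array in sorted_arrays]
--     sub_arr = [(next(array), idx) for idx, array in enumerate(sorted_iters)]
--     min_range = range = max(sub_arr)[0] - min(sub_arr)[0]
--     while all(sub_arr):
--         _, min_idx = min(sub_arr)
--         sub_arr[min_idx] = (next(sorted_iters[min_idx], None), min_idx)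
--         if sub_arr[min_idx][0] == None:
--             break
--         range = max(sub_arr)[0] - min(sub_arr)[0]
--
--         if range < min_range:
--             min_range = range
--     return min_range
-- ===== SOURCE B (Python) =====
-- import bisect
--
-- def find_closest_elements_in_sorted_arrays(sorted_arrays):
--     # Keep the current heads in a sorted list (priority queue via bisect):
--     # the minimum is heads[0], the maximum heads[-1]; no rescans of all heads.
--     heads = sorted((a[0], i) for i, a in enumerate(sorted_arrays))
--     pos = [1] * len(sorted_arrays)
--     best = heads[-1][0] - heads[0][0]
--     while True:
--         v, i = heads.pop(0)
--         if pos[i] == len(sorted_arrays[i]):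
--             return best
--         nxt = sorted_arrays[i][pos[i]]
--         pos[i] += 1
--         bisect.insort(heads, (nxt, i))
--         r = heads[-1][0] - heads[0][0]
--         if r < best:
--             best = r
-- ===== Notes on version B (the rewrite author's own statement) =====
-- stated objective: faster
-- what changed: B keeps the current heads in a bisect-maintained sorted list (a priority queue) with index cursors, popping the minimum at the front and reading the maximum at the back, instead of A's iterator list that is rescanned with min() and max() over all k tuples on every step.
-- outside the precondition, e.g. on find_closest_elements_in_sorted_arrays([]): A raises ValueError, B raises IndexError
import Mathlib
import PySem

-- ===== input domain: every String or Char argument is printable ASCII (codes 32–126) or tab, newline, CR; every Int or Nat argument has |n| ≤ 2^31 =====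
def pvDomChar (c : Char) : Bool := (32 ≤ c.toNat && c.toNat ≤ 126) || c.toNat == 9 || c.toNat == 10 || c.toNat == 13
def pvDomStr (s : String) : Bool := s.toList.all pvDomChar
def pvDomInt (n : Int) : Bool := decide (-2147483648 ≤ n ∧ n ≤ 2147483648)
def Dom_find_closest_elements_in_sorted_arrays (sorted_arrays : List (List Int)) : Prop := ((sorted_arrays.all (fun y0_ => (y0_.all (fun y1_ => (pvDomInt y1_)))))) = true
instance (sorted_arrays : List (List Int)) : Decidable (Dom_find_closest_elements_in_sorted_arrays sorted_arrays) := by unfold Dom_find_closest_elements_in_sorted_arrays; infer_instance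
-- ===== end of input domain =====

-- B replaces A's per-step min()/max() rescans of the head list by a bisect-maintained sorted
-- list of heads (pop the minimum at the front, read the maximum at the back); objective: faster (measured).

-- ===== PORT A =====
-- sub_arr = [(next(array), idx) for idx, array in enumerate(sorted_iters)]
-- (the enumerate indices 0,1,… are carried as Nat; Python compares them exactly the same way)
-- none = some next(array) raised StopIteration (an empty inner array): excluded by Pre_.
def pvHeadsA (ls : List (List Int)) (idx : Nat) : Option (List (Int × Nat)) :=
  match ls with
  | [] => some []
  | [] :: _ => none
  | (x :: _) :: t => (pvHeadsA t (idx + 1)).map (fun r => (x, idx) :: r)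

-- range = max(sub_arr)[0] - min(sub_arr)[0]   (Python tuple comparison is lexicographic = min2?/max2?;
-- the 0 fallback is unreachable: sub_arr is nonempty wherever this is evaluated)
def pvRangeA (sub : List (Int × Nat)) : Int :=
  match PySem.List.max2? sub (fun p => p.1) (fun p => p.2),
        PySem.List.min2? sub (fun p => p.1) (fun p => p.2) with
  | some M, some m => M.1 - m.1
  | _, _ => 0

-- the while loop: 'while all(sub_arr)' is always true (nonempty tuples are truthy), so the loop
-- exits only through the break, i.e. when next(sorted_iters[min_idx], None) returns None.
-- fuel counts loop iterations; every non-breaking iteration consumes one iterator element, so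
-- (number of remaining elements) + 1 iterations always reach the break.
def pvALoop (fuel : Nat) (iters : List (List Int)) (sub : List (Int × Nat)) (mr : Int) : Int :=
  match fuel with
  | 0 => mr
  | fuel + 1 =>
    match PySem.List.min2? sub (fun p => p.1) (fun p => p.2) with
    | none => mr          -- unreachable: sub_arr is nonempty
    | some (_, mi) =>
      match iters.getD mi [] with
      | [] => mr          -- next(…, None) returned None: break
      | nxt :: rest =>
        pvALoop fuel (iters.set mi rest) (sub.set mi (nxt, mi))
          (if pvRangeA (sub.set mi (nxt, mi)) < mr then pvRangeA (sub.set mi (nxt, mi)) else mr)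

def find_closest_elements_in_sorted_arrays (sorted_arrays : List (List Int)) : Int :=
  match pvHeadsA sorted_arrays 0 with
  | none => 0             -- next(array) raised StopIteration: excluded by Pre_
  | some sub0 =>
    match sub0 with
    | [] => 0             -- max([]) raises ValueError (empty outer list): excluded by Pre_
    | _ :: _ =>
      pvALoop (((sorted_arrays.map (List.drop 1)).map List.length).sum + 1)
        (sorted_arrays.map (List.drop 1)) sub0 (pvRangeA sub0)

-- ===== PORT B =====
-- heads = sorted((a[0], i) for i, a in enumerate(sorted_arrays)); none = IndexError on an empty a.
def pvHeadsB (ls : List (List Int)) (idx : Nat) : Option (List (Int × Nat)) :=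
  match ls with
  | [] => some []
  | [] :: _ => none
  | (x :: _) :: t => (pvHeadsB t (idx + 1)).map (fun r => (x, idx) :: r)

-- Python '<' on the (value, index) tuples, lexicographically (the order bisect.insort uses)
def pvLt (a b : Int × Nat) : Bool :=
  decide (a.1 < b.1) || (!decide (b.1 < a.1) && decide (a.2 < b.2))

-- bisect.insort(heads, x): insert x in front of the first strictly greater entry (exact here:
-- the entries carry pairwise distinct indices, so no entry equals x and left/right insertion agree)
def pvInsort (x : Int × Nat) (heads : List (Int × Nat)) : List (Int × Nat) :=
  PySem.List.insertBy pvLt x heads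

-- r = heads[-1][0] - heads[0][0]  (the (0,0) fallbacks are unreachable: heads is nonempty)
def pvRangeB (heads : List (Int × Nat)) : Int :=
  (heads.getLastD (0, 0)).1 - (heads.headD (0, 0)).1

def pvBLoop (fuel : Nat) (arrs : List (List Int)) (pos : List Nat)
    (heads : List (Int × Nat)) (best : Int) : Int :=
  match fuel with
  | 0 => best
  | fuel + 1 =>
    match heads with
    | [] => best          -- heads.pop(0) would raise IndexError; unreachable under Pre_
    | (_, i) :: rest =>
      if pos.getD i 0 = (arrs.getD i []).length then best
      else
        pvBLoop fuel arrs (pos.set i (pos.getD i 0 + 1))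
          (pvInsort ((arrs.getD i []).getD (pos.getD i 0) 0, i) rest)
          (if pvRangeB (pvInsort ((arrs.getD i []).getD (pos.getD i 0) 0, i) rest) < best
           then pvRangeB (pvInsort ((arrs.getD i []).getD (pos.getD i 0) 0, i) rest) else best)

def find_closest_elements_in_sorted_arrays_alt (sorted_arrays : List (List Int)) : Int :=
  match pvHeadsB sorted_arrays 0 with
  | none => 0             -- a[0] raised IndexError: excluded by Pre_
  | some hs =>
    let heads0 := PySem.List.sorted2 hs (fun p => p.1) (fun p => p.2)
    match heads0 with
    | [] => 0             -- heads[-1] raises IndexError (empty outer list): excluded by Pre_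
    | _ :: _ =>
      pvBLoop ((sorted_arrays.map (fun a => a.length - 1)).sum + 1) sorted_arrays
        (sorted_arrays.map (fun _ => 1)) heads0 (pvRangeB heads0)

-- ===== PRECONDITION & SPEC =====
-- Exactly the inputs on which Python A returns: a nonempty list of nonempty arrays
-- (A raises ValueError via max([]) on [], and StopIteration on any empty inner array).
def Pre_find_closest_elements_in_sorted_arrays (sorted_arrays : List (List Int)) : Prop :=
  sorted_arrays ≠ [] ∧ ∀ a ∈ sorted_arrays, a ≠ []
instance (sorted_arrays : List (List Int)) : Decidable (Pre_find_closest_elements_in_sorted_arrays sorted_arrays) := by unfold Pre_find_closest_elements_in_sorted_arrays; infer_instance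

def pvWitness_find_closest_elements_in_sorted_arrays : List (List Int) := [[5, 10, 15], [3, 6, 9, 12, 15], [8, 16, 24]]

def Spec_find_closest_elements_in_sorted_arrays (sorted_arrays : List (List Int)) (out : Int) : Prop := out = find_closest_elements_in_sorted_arrays_alt sorted_arrays
instance (sorted_arrays : List (List Int)) (out : Int) : Decidable (Spec_find_closest_elements_in_sorted_arrays sorted_arrays out) := by unfold Spec_find_closest_elements_in_sorted_arrays; infer_instance

-- ===== CLAIM (what is proved, stated in full; the proofs are below) =====
def Claim_equal_find_closest_elements_in_sorted_arrays : Prop := ∀ (sorted_arrays : List (List Int)), Dom_find_closest_elements_in_sorted_arrays sorted_arrays → Pre_find_closest_elements_in_sorted_arrays sorted_arrays → Spec_find_closest_elements_in_sorted_arrays sorted_arrays (find_closest_elements_in_sorted_arrays sorted_arrays)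

-- ===== LEMMAS AND PROOFS =====

-- strict lexicographic order on the (value, index) pairs, as a Prop
def LexLt (a b : Int × Nat) : Prop := a.1 < b.1 ∨ (a.1 = b.1 ∧ a.2 < b.2)

lemma pvLt_iff (a b : Int × Nat) : pvLt a b = true ↔ LexLt a b := by
  simp [pvLt, LexLt]; omega

lemma lexLt_trans {a b c : Int × Nat} (h1 : LexLt a b) (h2 : LexLt b c) : LexLt a c := by
  simp only [LexLt] at *; omega

lemma lexLt_total {a b : Int × Nat} (h : a ≠ b) : LexLt a b ∨ LexLt b a := by
  rcases a with ⟨a1, a2⟩; rcases b with ⟨b1, b2⟩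
  simp only [ne_eq, Prod.mk.injEq, not_and] at h
  simp only [LexLt]; omega

lemma lexLt_irrefl (a : Int × Nat) : ¬ LexLt a a := by simp [LexLt]

-- Python min()/max() over a list of pairs, written as their underlying folds
def pvMinStep (acc : Option (Int × Nat)) (x : Int × Nat) : Option (Int × Nat) :=
  match acc with
  | none => some x
  | some m => if pvLt x m then some x else some m

def pvMaxStep (acc : Option (Int × Nat)) (x : Int × Nat) : Option (Int × Nat) :=
  match acc with
  | none => some x
  | some m => if pvLt m x then some x else some m

lemma min2_eq_foldl (xs : List (Int × Nat)) :
    PySem.List.min2? xs (fun p => p.1) (fun p => p.2) = List.foldl pvMinStep none xs := by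
  unfold PySem.List.min2?
  congr 1
  funext acc x
  cases acc <;> simp [pvMinStep, pvLt]

lemma max2_eq_foldl (xs : List (Int × Nat)) :
    PySem.List.max2? xs (fun p => p.1) (fun p => p.2) = List.foldl pvMaxStep none xs := by
  unfold PySem.List.max2?
  congr 1
  funext acc x
  cases acc <;> simp [pvMaxStep, pvLt]

lemma min2_fold (xs : List (Int × Nat)) : ∀ (m0 : Int × Nat),
    ∃ m, List.foldl pvMinStep (some m0) xs = some m ∧
      (m = m0 ∨ m ∈ xs) ∧ ∀ y, (y = m0 ∨ y ∈ xs) → ¬ LexLt y m := by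
  induction xs with
  | nil =>
    intro m0
    exact ⟨m0, rfl, Or.inl rfl, by rintro y (rfl | h); exacts [lexLt_irrefl y, by simp at h]⟩
  | cons x t ih =>
    intro m0
    by_cases hx : LexLt x m0
    · obtain ⟨m, he, hmem, hmin⟩ := ih x
      refine ⟨m, ?_, ?_, ?_⟩
      · simpa [List.foldl_cons, pvMinStep, (pvLt_iff x m0).2 hx] using he
      · rcases hmem with rfl | h
        · exact Or.inr (.head _)
        · exact Or.inr (.tail _ h)
      · rintro y (rfl | hy)
        · intro hc; exact hmin x (Or.inl rfl) (lexLt_trans hx hc)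
        · rcases List.mem_cons.1 hy with rfl | hy
          · exact hmin y (Or.inl rfl)
          · exact hmin y (Or.inr hy)
    · obtain ⟨m, he, hmem, hmin⟩ := ih m0
      have hb : pvLt x m0 = false := by
        rcases h : pvLt x m0
        · rfl
        · exact absurd ((pvLt_iff x m0).1 h) hx
      refine ⟨m, ?_, ?_, ?_⟩
      · simpa [List.foldl_cons, pvMinStep, hb] using he
      · rcases hmem with rfl | h
        · exact Or.inl rfl
        · exact Or.inr (.tail _ h)
      · rintro y (rfl | hy)
        · exact hmin y (Or.inl rfl)
        · rcases List.mem_cons.1 hy with rfl | hy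
          · intro hc
            rcases eq_or_ne y m0 with rfl | hne
            · exact hmin y (Or.inl rfl) hc
            · rcases lexLt_total hne with h1 | h1
              · exact hx h1
              · exact hmin m0 (Or.inl rfl) (lexLt_trans h1 hc)
          · exact hmin y (Or.inr hy)

lemma max2_fold (xs : List (Int × Nat)) : ∀ (m0 : Int × Nat),
    ∃ m, List.foldl pvMaxStep (some m0) xs = some m ∧
      (m = m0 ∨ m ∈ xs) ∧ ∀ y, (y = m0 ∨ y ∈ xs) → ¬ LexLt m y := by
  induction xs with
  | nil =>
    intro m0
    exact ⟨m0, rfl, Or.inl rfl, by rintro y (rfl | h); exacts [lexLt_irrefl y, by simp at h]⟩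
  | cons x t ih =>
    intro m0
    by_cases hx : LexLt m0 x
    · obtain ⟨m, he, hmem, hmax⟩ := ih x
      refine ⟨m, ?_, ?_, ?_⟩
      · simpa [List.foldl_cons, pvMaxStep, (pvLt_iff m0 x).2 hx] using he
      · rcases hmem with rfl | h
        · exact Or.inr (.head _)
        · exact Or.inr (.tail _ h)
      · rintro y (rfl | hy)
        · intro hc; exact hmax x (Or.inl rfl) (lexLt_trans hc hx)
        · rcases List.mem_cons.1 hy with rfl | hy
          · exact hmax y (Or.inl rfl)
          · exact hmax y (Or.inr hy)
    · obtain ⟨m, he, hmem, hmax⟩ := ih m0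
      have hb : pvLt m0 x = false := by
        rcases h : pvLt m0 x
        · rfl
        · exact absurd ((pvLt_iff m0 x).1 h) hx
      refine ⟨m, ?_, ?_, ?_⟩
      · simpa [List.foldl_cons, pvMaxStep, hb] using he
      · rcases hmem with rfl | h
        · exact Or.inl rfl
        · exact Or.inr (.tail _ h)
      · rintro y (rfl | hy)
        · exact hmax y (Or.inl rfl)
        · rcases List.mem_cons.1 hy with rfl | hy
          · intro hc
            rcases eq_or_ne y m0 with rfl | hne
            · exact hmax y (Or.inl rfl) hc
            · rcases lexLt_total (Ne.symm hne) with h1 | h1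
              · exact hx h1
              · exact hmax m0 (Or.inl rfl) (lexLt_trans hc h1)
          · exact hmax y (Or.inr hy)

lemma min2_spec (xs : List (Int × Nat)) (hne : xs ≠ []) :
    ∃ m, PySem.List.min2? xs (fun p => p.1) (fun p => p.2) = some m ∧ m ∈ xs ∧
      ∀ y ∈ xs, ¬ LexLt y m := by
  rcases xs with _ | ⟨x, t⟩
  · exact absurd rfl hne
  · obtain ⟨m, he, hmem, hmin⟩ := min2_fold t x
    refine ⟨m, ?_, ?_, ?_⟩
    · rw [min2_eq_foldl]
      simpa [List.foldl_cons, pvMinStep] using he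
    · rcases hmem with rfl | h
      · exact .head _
      · exact .tail _ h
    · intro y hy
      rcases List.mem_cons.1 hy with rfl | hy
      · exact hmin y (Or.inl rfl)
      · exact hmin y (Or.inr hy)

lemma max2_spec (xs : List (Int × Nat)) (hne : xs ≠ []) :
    ∃ m, PySem.List.max2? xs (fun p => p.1) (fun p => p.2) = some m ∧ m ∈ xs ∧
      ∀ y ∈ xs, ¬ LexLt m y := by
  rcases xs with _ | ⟨x, t⟩
  · exact absurd rfl hne
  · obtain ⟨m, he, hmem, hmax⟩ := max2_fold t x
    refine ⟨m, ?_, ?_, ?_⟩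
    · rw [max2_eq_foldl]
      simpa [List.foldl_cons, pvMaxStep] using he
    · rcases hmem with rfl | h
      · exact .head _
      · exact .tail _ h
    · intro y hy
      rcases List.mem_cons.1 hy with rfl | hy
      · exact hmax y (Or.inl rfl)
      · exact hmax y (Or.inr hy)

-- the head of a strictly sorted permutation of sub is Python's min(sub)
lemma min2_eq_head {sub heads : List (Int × Nat)} {m : Int × Nat} {t : List (Int × Nat)}
    (hperm : heads.Perm sub) (hsort : heads.Pairwise LexLt) (hh : heads = m :: t) :
    PySem.List.min2? sub (fun p => p.1) (fun p => p.2) = some m := by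
  subst hh
  have hne : sub ≠ [] := by
    intro h; subst h; exact absurd hperm.length_eq (by simp)
  obtain ⟨m', he, hmem, hmin⟩ := min2_spec sub hne
  have hm' : m' ∈ m :: t := hperm.symm.subset hmem
  rcases List.mem_cons.1 hm' with rfl | hm'
  · exact he
  · have h1 : LexLt m m' := (List.pairwise_cons.1 hsort).1 m' hm'
    have h2 : ¬ LexLt m m' := hmin m (hperm.subset (List.mem_cons_self))
    exact absurd h1 h2

lemma last_is_max {heads : List (Int × Nat)} (hsort : heads.Pairwise LexLt)
    (hne : heads ≠ []) : ∀ y ∈ heads, y = heads.getLast hne ∨ LexLt y (heads.getLast hne) := by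
  intro y hy
  have hd : heads.dropLast ++ [heads.getLast hne] = heads := List.dropLast_append_getLast hne
  rw [← hd] at hsort hy
  rcases List.mem_append.1 hy with hy | hy
  · right
    exact ((List.pairwise_append.1 hsort).2.2 y hy _ (List.mem_singleton_self _))
  · left
    exact List.mem_singleton.1 hy

-- the last element of a strictly sorted permutation of sub is Python's max(sub)
lemma max2_eq_last {sub heads : List (Int × Nat)}
    (hperm : heads.Perm sub) (hsort : heads.Pairwise LexLt) (hne : heads ≠ []) :
    PySem.List.max2? sub (fun p => p.1) (fun p => p.2) = some (heads.getLast hne) := by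
  have hsubne : sub ≠ [] := by
    intro h; subst h; exact hne (List.eq_nil_of_length_eq_zero (by simpa using hperm.length_eq))
  obtain ⟨M, he, hmem, hmax⟩ := max2_spec sub hsubne
  have hM : M ∈ heads := hperm.symm.subset hmem
  rcases last_is_max hsort hne M hM with rfl | h1
  · exact he
  · have h2 : ¬ LexLt M (heads.getLast hne) :=
      hmax _ (hperm.subset (List.getLast_mem hne))
    exact absurd h1 h2

-- A's max-min over sub equals B's last-head over the sorted heads
lemma rangeA_eq_rangeB {sub heads : List (Int × Nat)}
    (hperm : heads.Perm sub) (hsort : heads.Pairwise LexLt) (hne : heads ≠ []) :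
    pvRangeA sub = pvRangeB heads := by
  rcases hh : heads with _ | ⟨m, t⟩
  · exact absurd hh hne
  · subst hh
    rw [pvRangeA, min2_eq_head hperm hsort rfl, max2_eq_last hperm hsort hne]
    rw [pvRangeB, List.getLastD_eq_getLast?, List.getLast?_eq_some_getLast hne]
    rfl

lemma insort_perm (x : Int × Nat) (t : List (Int × Nat)) : (pvInsort x t).Perm (x :: t) := by
  induction t with
  | nil => simp [pvInsort, PySem.List.insertBy]
  | cons y ys ih =>
    rw [pvInsort, PySem.List.insertBy]
    split
    · rfl
    · exact (((ih).cons y).trans (List.Perm.swap x y ys)).symm.symm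

lemma insort_pairwise {x : Int × Nat} {t : List (Int × Nat)} (hs : t.Pairwise LexLt)
    (hne : ∀ y ∈ t, y ≠ x) : (pvInsort x t).Pairwise LexLt := by
  induction t with
  | nil => simp [pvInsort, PySem.List.insertBy]
  | cons y ys ih =>
    rw [pvInsort, PySem.List.insertBy]
    rcases List.pairwise_cons.1 hs with ⟨hy, hys⟩
    split
    · rename_i hlt
      refine List.pairwise_cons.2 ⟨?_, hs⟩
      intro z hz
      rcases List.mem_cons.1 hz with rfl | hz
      · exact (pvLt_iff x z).1 hlt
      · exact lexLt_trans ((pvLt_iff x y).1 hlt) (hy z hz)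
    · rename_i hnlt
      have hyx : LexLt y x := by
        rcases lexLt_total (hne y (List.mem_cons_self)) with h | h
        · exact h
        · exact absurd ((pvLt_iff x y).2 h) (by simpa using hnlt)
      refine List.pairwise_cons.2 ⟨?_, ih hys (fun z hz => hne z (List.mem_cons_of_mem _ hz))⟩
      intro z hz
      have : z ∈ x :: ys := (insort_perm x ys).subset hz
      rcases List.mem_cons.1 this with rfl | hz'
      · exact hyx
      · exact hy z hz'

lemma foldl_insort_pairwise :
    ∀ (xs acc : List (Int × Nat)), acc.Pairwise LexLt →
      ((acc ++ xs).map Prod.snd).Nodup →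
      (xs.foldl (fun acc x => PySem.List.insertBy pvLt x acc) acc).Pairwise LexLt := by
  intro xs
  induction xs with
  | nil => intro acc h _; simpa using h
  | cons x t ih =>
    intro acc hacc hnod
    rw [List.foldl_cons]
    have hperm : ((PySem.List.insertBy pvLt x acc) ++ t).Perm (acc ++ x :: t) :=
      ((insort_perm x acc).append_right t).trans (List.perm_middle).symm
    have hnod' : (((PySem.List.insertBy pvLt x acc) ++ t).map Prod.snd).Nodup := by
      refine (List.Perm.nodup_iff (hperm.map Prod.snd)).2 ?_
      simpa using hnod
    refine ih _ ?_ hnod'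
    refine insort_pairwise hacc ?_
    intro y hy hyx
    subst hyx
    have : ((acc ++ y :: t).map Prod.snd).Nodup := by simpa using hnod
    rw [List.map_append] at this
    have h2 := (List.nodup_append.1 this).2.2
    have hmem1 : y.2 ∈ acc.map Prod.snd := List.mem_map_of_mem hy
    have hmem2 : y.2 ∈ (y :: t).map Prod.snd := by simp
    exact h2 y.2 hmem1 y.2 hmem2 rfl

lemma sorted2_pairwise_of_nodup_snd (xs : List (Int × Nat)) (hn : (xs.map Prod.snd).Nodup) :
    (PySem.List.sorted2 xs (fun p => p.1) (fun p => p.2)).Pairwise LexLt := by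
  have he : PySem.List.sorted2 xs (fun p => p.1) (fun p => p.2) =
      xs.foldl (fun acc x => PySem.List.insertBy pvLt x acc) [] := by
    unfold PySem.List.sorted2
    congr 1
  rw [he]
  exact foldl_insort_pairwise xs [] (by simp) (by simpa using hn)

lemma pvHeadsB_eq_pvHeadsA (ls : List (List Int)) (i : Nat) : pvHeadsB ls i = pvHeadsA ls i := by
  induction ls generalizing i with
  | nil => rfl
  | cons a t ih => cases a <;> simp [pvHeadsA, pvHeadsB, ih]

lemma pvHeadsA_spec (ls : List (List Int)) (hne : ∀ a ∈ ls, a ≠ []) : ∀ (i : Nat),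
    pvHeadsA ls i =
      some ((List.range ls.length).map (fun j => ((ls.getD j []).headD 0, i + j))) := by
  induction ls with
  | nil => intro i; simp [pvHeadsA]
  | cons a t ih =>
    intro i
    rcases a with _ | ⟨x, rest⟩
    · exact absurd rfl (hne [] (List.mem_cons_self))
    · rw [pvHeadsA, ih (fun b hb => hne b (List.mem_cons_of_mem _ hb)) (i + 1)]
      simp only [Option.map_some, Option.some.injEq]
      rw [List.length_cons, List.range_succ_eq_map, List.map_cons, List.map_map]
      refine congrArg₂ _ ?_ ?_
      · simp
      · refine List.map_congr_left ?_
        intro j hj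
        simp only [Function.comp_apply, List.getD_cons_succ]
        refine congrArg₂ _ rfl (by omega)

-- the loop invariant tying A's state (iters, sub) to B's state (pos, heads)
def pvInv (ls iters : List (List Int)) (sub : List (Int × Nat)) (pos : List Nat)
    (heads : List (Int × Nat)) : Prop :=
  sub ≠ [] ∧ sub.length = ls.length ∧ pos.length = ls.length ∧ iters.length = ls.length ∧
  (∀ j (hj : j < sub.length), (sub[j]).2 = j) ∧
  (∀ j, j < ls.length → pos.getD j 0 ≤ (ls.getD j []).length ∧
        iters.getD j [] = (ls.getD j []).drop (pos.getD j 0)) ∧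
  heads.Perm sub ∧ heads.Pairwise LexLt

lemma mem_snd_lt {sub : List (Int × Nat)} (hsnd : ∀ j (hj : j < sub.length), (sub[j]).2 = j)
    {v : Int} {i : Nat} (h : (v, i) ∈ sub) : ∃ (hi : i < sub.length), sub[i] = (v, i) := by
  obtain ⟨j, hj, he⟩ := List.getElem_of_mem h
  have h2 := hsnd j hj
  rw [he] at h2
  subst h2
  exact ⟨hj, he⟩

lemma map_snd_eq_range {sub : List (Int × Nat)}
    (hsnd : ∀ j (hj : j < sub.length), (sub[j]).2 = j) :
    sub.map Prod.snd = List.range sub.length := by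
  refine List.ext_getElem (by simp) ?_
  intro i h1 h2
  simp only [List.getElem_map, List.getElem_range]
  exact hsnd i (by simpa using h1)

lemma set_perm (l : List (Int × Nat)) (i : Nat) (v : Int × Nat) (h : i < l.length) :
    (l.set i v).Perm (v :: l.eraseIdx i) := by
  rw [List.set_eq_take_append_cons_drop, if_pos h, List.eraseIdx_eq_take_drop_succ]
  exact List.perm_middle

lemma getD_set_self {α : Type} (l : List α) (i : Nat) (v d : α) (h : i < l.length) :
    (l.set i v).getD i d = v := by
  simp [List.getD_eq_getElem?_getD, h]

lemma getD_set_ne {α : Type} (l : List α) {i j : Nat} (v : α) (d : α) (h : j ≠ i) :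
    (l.set i v).getD j d = l.getD j d := by
  simp [List.getD_eq_getElem?_getD, Ne.symm h]

-- the two loops run in lockstep and return the same value
lemma loop_eq (ls : List (List Int)) :
    ∀ (fuel : Nat) (iters : List (List Int)) (sub : List (Int × Nat)) (pos : List Nat)
      (heads : List (Int × Nat)) (acc : Int), pvInv ls iters sub pos heads →
      pvALoop fuel iters sub acc = pvBLoop fuel ls pos heads acc := by
  intro fuel
  induction fuel with
  | zero => intro iters sub pos heads acc _; rfl
  | succ f ih =>
    intro iters sub pos heads acc hInv
    obtain ⟨hne, hlen, hplen, hilen, hsnd, hpi, hperm, hsort⟩ := hInv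
    rcases hh : heads with _ | ⟨⟨v, i⟩, rest⟩
    · rw [hh] at hperm
      exact absurd (List.eq_nil_of_length_eq_zero (by simpa using hperm.length_eq.symm)) hne
    subst hh
    have hmin := min2_eq_head hperm hsort rfl
    have hvi_mem : (v, i) ∈ sub := hperm.subset List.mem_cons_self
    obtain ⟨hi, hsubi⟩ := mem_snd_lt hsnd hvi_mem
    have hik : i < ls.length := hlen ▸ hi
    obtain ⟨hple, hitd⟩ := hpi i hik
    rw [pvALoop, pvBLoop]
    simp only [hmin, hitd]
    by_cases hpe : pos.getD i 0 = (ls.getD i []).length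
    · rw [hpe, List.drop_length]
      simp
    · have hplt : pos.getD i 0 < (ls.getD i []).length := lt_of_le_of_ne hple hpe
      rw [List.drop_eq_getElem_cons hplt, if_neg hpe]
      have hrest_perm : rest.Perm (sub.eraseIdx i) := by
        have h1 : sub.Perm (sub[i] :: sub.eraseIdx i) :=
          (List.getElem_cons_eraseIdx_perm hi).symm
        rw [hsubi] at h1
        exact (hperm.trans h1).cons_inv
      have hperm' : (pvInsort ((ls.getD i [])[pos.getD i 0], i) rest).Perm
          (sub.set i ((ls.getD i [])[pos.getD i 0], i)) := by
        refine (insort_perm _ _).trans ?_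
        refine (hrest_perm.cons _).trans ?_
        exact (set_perm sub i _ hi).symm
      have hnodsnd : ((((v, i) : Int × Nat) :: rest).map Prod.snd).Nodup := by
        refine (List.Perm.nodup_iff ((hperm.map Prod.snd))).2 ?_
        rw [map_snd_eq_range hsnd]
        exact List.nodup_range
      have hsort' : (pvInsort ((ls.getD i [])[pos.getD i 0], i) rest).Pairwise LexLt := by
        refine insort_pairwise (List.pairwise_cons.1 hsort).2 ?_
        intro y hy hne2
        rcases hnodsnd with _ | ⟨hni, _⟩
        exact hni y.2 (List.mem_map_of_mem hy) (by rw [hne2])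
      have hne' : pvInsort ((ls.getD i [])[pos.getD i 0], i) rest ≠ [] := by
        intro h
        have := (insort_perm ((ls.getD i [])[pos.getD i 0], i) rest).length_eq
        rw [h] at this
        simp at this
      have hr : pvRangeA (sub.set i ((ls.getD i [])[pos.getD i 0], i)) =
          pvRangeB (pvInsort ((ls.getD i [])[pos.getD i 0], i) rest) :=
        rangeA_eq_rangeB hperm' hsort' hne'
      have hnxt : (ls.getD i []).getD (pos.getD i 0) 0 = (ls.getD i [])[pos.getD i 0] :=
        List.getD_eq_getElem _ _ hplt
      simp only [hnxt]
      rw [hr]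
      refine ih _ _ _ _ _ ?_
      refine ⟨?_, ?_, ?_, ?_, ?_, ?_, hperm', hsort'⟩
      · intro h
        have h0 : sub.length = 0 := by simpa using congrArg List.length h
        exact hne (List.eq_nil_of_length_eq_zero h0)
      · simp [hlen]
      · simp [hplen]
      · simp [hilen]
      · intro j hj
        simp only [List.getElem_set]
        split
        · rename_i hji; omega
        · exact hsnd j (by simpa using hj)
      · intro j hjk
        by_cases hji : j = i
        · subst hji
          rw [getD_set_self pos j _ 0 (by omega), getD_set_self iters j _ [] (by omega)]
          refine ⟨by omega, ?_⟩
          rfl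
        · rw [getD_set_ne pos _ _ hji, getD_set_ne iters _ _ hji]
          exact hpi j hjk

-- ===== VERDICT (by name: the statement is the Claim_ definition above) =====
theorem find_closest_elements_in_sorted_arrays_spec : Claim_equal_find_closest_elements_in_sorted_arrays := by
  intro ls _ hpre
  obtain ⟨hne0, hall⟩ := hpre
  unfold Spec_find_closest_elements_in_sorted_arrays
  unfold find_closest_elements_in_sorted_arrays find_closest_elements_in_sorted_arrays_alt
  rw [pvHeadsB_eq_pvHeadsA, pvHeadsA_spec ls hall 0]
  set sub0 := (List.range ls.length).map (fun j => ((ls.getD j []).headD 0, 0 + j)) with hsub0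
  have hlen0 : sub0.length = ls.length := by simp [hsub0]
  have hsnd0 : ∀ j (hj : j < sub0.length), (sub0[j]).2 = j := by
    intro j hj
    simp [hsub0]
  have hs0ne : sub0 ≠ [] := by
    intro h
    have := congrArg List.length h
    rw [hlen0] at this
    simp at this
    exact hne0 this
  have hnod0 : (sub0.map Prod.snd).Nodup := by
    rw [map_snd_eq_range hsnd0]
    exact List.nodup_range
  have hperm0 : (PySem.List.sorted2 sub0 (fun p => p.1) (fun p => p.2)).Perm sub0 :=
    PySem.List.sorted2_perm sub0 _ _ false
  have hsort0 : (PySem.List.sorted2 sub0 (fun p => p.1) (fun p => p.2)).Pairwise LexLt :=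
    sorted2_pairwise_of_nodup_snd sub0 hnod0
  have hh0ne : PySem.List.sorted2 sub0 (fun p => p.1) (fun p => p.2) ≠ [] := by
    intro h
    have hl := hperm0.length_eq
    rw [h] at hl
    simp only [List.length_nil] at hl
    exact hs0ne (List.eq_nil_of_length_eq_zero hl.symm)
  obtain ⟨m, t, hmt⟩ : ∃ m t, sub0 = m :: t := by
    rcases sub0 with _ | ⟨m, t⟩
    · exact absurd rfl hs0ne
    · exact ⟨m, t, rfl⟩
  obtain ⟨hm, ht, hhmt⟩ : ∃ hm ht, PySem.List.sorted2 sub0 (fun p => p.1) (fun p => p.2) = hm :: ht := by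
    rcases hx : PySem.List.sorted2 sub0 (fun p => p.1) (fun p => p.2) with _ | ⟨hm, ht⟩
    · exact absurd hx hh0ne
    · exact ⟨hm, ht, rfl⟩
  have hhmt' : PySem.List.sorted2 (m :: t) (fun p => p.1) (fun p => p.2) = hm :: ht := by
    rw [← hmt]; exact hhmt
  rw [hmt] at hperm0 hsort0 hh0ne hlen0 hsnd0 hs0ne
  rw [hhmt'] at hperm0 hsort0 hh0ne
  rw [hmt]
  simp only [hhmt']
  have hfuel : ((ls.map (List.drop 1)).map List.length).sum = (ls.map (fun a => a.length - 1)).sum := by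
    rw [List.map_map]
    refine congrArg _ (List.map_congr_left ?_)
    intro a _
    simp
  rw [hfuel, rangeA_eq_rangeB hperm0 hsort0 hh0ne]
  rw [← hhmt']
  refine loop_eq ls _ _ _ _ _ _ ?_
  rw [hhmt']
  refine ⟨hs0ne, hlen0, by simp, by simp, hsnd0, ?_, hperm0, hsort0⟩
  intro j hj
  have hmem : ls.getD j [] ∈ ls := by
    rw [List.getD_eq_getElem ls [] hj]
    exact List.getElem_mem hj
  have hnej := hall _ hmem
  have hlj : 1 ≤ (ls.getD j []).length := List.length_pos_of_ne_nil hnej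
  constructor
  · have : (ls.map (fun _ => (1:Nat))).getD j 0 = 1 := by
      rw [List.getD_eq_getElem?_getD, List.getElem?_map]
      simp [List.getElem?_eq_getElem hj]
    rw [this]
    exact hlj
  · have h1 : (ls.map (fun _ => (1:Nat))).getD j 0 = 1 := by
      rw [List.getD_eq_getElem?_getD, List.getElem?_map]
      simp [List.getElem?_eq_getElem hj]
    have h2 : (ls.map (List.drop 1)).getD j [] = (ls.getD j []).drop 1 := by
      rw [List.getD_eq_getElem?_getD, List.getElem?_map]
      simp [List.getElem?_eq_getElem hj]
    rw [h1, h2]
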